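-- pv_equiv track=rewrite | github.com/gokulraviteja/AI-TICTACTOE-HUMAN-COMPUTER | basicver.py | evaluate
-- ===== SOURCE A (Python) =====
-- def evaluate(ar):
--     a=[]
--     for i in ar:
--         for j in i:
--             a.append(j)
--     if(a[0]==a[1]==a[2] or a[0]==a[3]==a[6]):
--         if(a[0]!=' ' and a[0]==C):
--             return 1
--         elif(a[0]!=' ' and a[0]==U):
--             return -1
--
--     if(a[3]==a[4]==a[5] or a[1]==a[4]==a[7]):
--         if(a[4]!=' ' and a[4]==C):
--             return 1
--         elif(a[4]!=' ' and a[4]==U):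
--             return -1
--
--     if(a[6]==a[7]==a[8] or a[2]==a[5]==a[8]):
--         if(a[8]!=' ' and a[8]==C):
--             return 1
--         elif(a[8]!=' ' and a[8]==U):
--             return -1
--
--     if(a[0]==a[4]==a[8] or a[2]==a[4]==a[6]):
--         if(a[4]!=' ' and a[4]==C):
--             return 1
--         elif(a[4]!=' ' and a[4]==U):
--             return -1
--
--     return 0
--
-- U='X'
--
-- C='O'
-- ===== SOURCE B (Python) =====
-- # Structural rewrite: reconstruct the three rows by slicing, get the columns by
-- # transposing with zip, and judge every line with one uniform winner helper and
-- # a score dict -- no unrolled index comparisons, no representative-cell shortcut.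
-- U = 'X'
-- C = 'O'
-- SCORE = {C: 1, U: -1}
--
-- def _winner(line):
--     x = line[0]
--     if line.count(x) == 3 and x in SCORE:
--         return x
--     return None
--
-- def evaluate(ar):
--     cells = []
--     for row in ar:
--         cells.extend(row)
--     rows = [cells[0:3], cells[3:6], cells[6:9]]
--     cols = [list(t) for t in zip(*rows)]
--     for row, col in zip(rows, cols):
--         for line in (row, col):
--             w = _winner(line)
--             if w is not None:
--                 return SCORE[w]
--     for diag in ([cells[0], cells[4], cells[8]], [cells[2], cells[4], cells[6]]):
--         w = _winner(diag)
--         if w is not None: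
--             return SCORE[w]
--     return 0
-- ===== Notes on version B (the rewrite author's own statement) =====
-- stated objective: idiomatic
-- what changed: Instead of A's flat 9-cell list probed by four hand-unrolled if-blocks over hard-coded indices with a shared representative cell, B rebuilds the three rows by slicing, obtains the columns by transposing with zip, and judges every line with one uniform winner helper (line.count(x)==3 and membership in a score dict), dropping the redundant blank-cell test.
-- outside the precondition, e.g. on evaluate([['X', 'X', 'X']]): A returns -1, B raises IndexError; on evaluate([['O', 'X'], ['X', 'X', 'X']]): A raises IndexError, B raises IndexError
import Mathlib
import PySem

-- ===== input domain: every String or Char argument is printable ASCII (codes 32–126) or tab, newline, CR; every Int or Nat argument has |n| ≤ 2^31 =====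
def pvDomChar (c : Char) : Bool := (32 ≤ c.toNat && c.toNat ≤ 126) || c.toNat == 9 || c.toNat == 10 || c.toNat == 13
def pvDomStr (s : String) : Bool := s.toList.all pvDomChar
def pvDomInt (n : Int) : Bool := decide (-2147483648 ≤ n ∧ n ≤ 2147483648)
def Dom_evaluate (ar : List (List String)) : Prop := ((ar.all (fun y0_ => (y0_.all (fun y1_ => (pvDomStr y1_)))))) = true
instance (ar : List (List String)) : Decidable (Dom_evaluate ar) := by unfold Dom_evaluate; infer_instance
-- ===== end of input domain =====

-- B rebuilds the rows by slicing, gets the columns by transposing with zip, and judges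
-- every line with one uniform winner helper and a score dict — no unrolled index blocks.

def pvU : String := "X"  -- module constant U
def pvC : String := "O"  -- module constant C

-- ===== PORT A =====
-- A's board indexing a[i]: PySem.List.pyGet? with .getD "" — exact wherever Python does not
-- raise IndexError; Pre_evaluate excludes the boards (fewer than 9 cells) where it may.
-- A's four sequential if-blocks are transliterated continuation-style: pvA<k> g is the rest
-- of A's function from its k-th if-block on (a failed inner test falls through to it).
def pvA4 (g : Int → String) : Int :=
  if (g 0 = g 4 ∧ g 4 = g 8) ∨ (g 2 = g 4 ∧ g 4 = g 6) then
    if g 4 ≠ " " ∧ g 4 = pvC then 1 else if g 4 ≠ " " ∧ g 4 = pvU then -1 else 0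
  else 0

def pvA3 (g : Int → String) : Int :=
  if (g 6 = g 7 ∧ g 7 = g 8) ∨ (g 2 = g 5 ∧ g 5 = g 8) then
    if g 8 ≠ " " ∧ g 8 = pvC then 1 else if g 8 ≠ " " ∧ g 8 = pvU then -1 else pvA4 g
  else pvA4 g

def pvA2 (g : Int → String) : Int :=
  if (g 3 = g 4 ∧ g 4 = g 5) ∨ (g 1 = g 4 ∧ g 4 = g 7) then
    if g 4 ≠ " " ∧ g 4 = pvC then 1 else if g 4 ≠ " " ∧ g 4 = pvU then -1 else pvA3 g
  else pvA3 g

def pvA1 (g : Int → String) : Int :=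
  if (g 0 = g 1 ∧ g 1 = g 2) ∨ (g 0 = g 3 ∧ g 3 = g 6) then
    if g 0 ≠ " " ∧ g 0 = pvC then 1 else if g 0 ≠ " " ∧ g 0 = pvU then -1 else pvA2 g
  else pvA2 g

def evaluate (ar : List (List String)) : Int :=
  -- a=[]; for i in ar: for j in i: a.append(j)
  let a := ar.foldl (fun acc i => i.foldl (fun acc2 j => acc2 ++ [j]) acc) ([] : List String)
  pvA1 (fun n => (PySem.List.pyGet? a n).getD "")

-- ===== PORT B =====
def pvSCORE : PySem.Dict String Int := PySem.Dict.ofList [(pvC, 1), (pvU, -1)]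

-- _winner(line): line[0] is pyGetD … "" — exact wherever Python does not raise (Pre_ ensures it)
def pvWinner (line : List String) : Option String :=
  let x := PySem.List.pyGetD line 0 ""
  if PySem.List.count line x = 3 ∧ pvSCORE.contains x = true then some x else none

-- for row, col in zip(rows, cols): for line in (row, col): …
def pvScanPairs (ps : List (List String × List String)) : Option Int :=
  match ps with
  | [] => none
  | (r, c) :: rest =>
    match pvWinner r with
    | some w => some ((pvSCORE.get? w).getD 0)
    | none =>
      match pvWinner c with
      | some w => some ((pvSCORE.get? w).getD 0)
      | none => pvScanPairs rest

-- for diag in (…, …): …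
def pvScanLines (ls : List (List String)) : Option Int :=
  match ls with
  | [] => none
  | l :: rest =>
    match pvWinner l with
    | some w => some ((pvSCORE.get? w).getD 0)
    | none => pvScanLines rest

def evaluate_alt (ar : List (List String)) : Int :=
  -- cells = []; for row in ar: cells.extend(row)
  let cells := ar.foldl (fun acc row => acc ++ row) ([] : List String)
  let r0 := PySem.List.slice cells (some 0) (some 3)
  let r1 := PySem.List.slice cells (some 3) (some 6)
  let r2 := PySem.List.slice cells (some 6) (some 9)
  -- cols = [list(t) for t in zip(*rows)]
  let cols := (r0.zip (r1.zip r2)).map (fun p => [p.1, p.2.1, p.2.2])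
  match pvScanPairs ([r0, r1, r2].zip cols) with
  | some v => v
  | none =>
    let g := fun (n : Int) => PySem.List.pyGetD cells n ""
    match pvScanLines [[g 0, g 4, g 8], [g 2, g 4, g 6]] with
    | some v => v
    | none => 0

-- ===== PRECONDITION & SPEC =====
-- Pre_ excludes boards with fewer than 9 cells: there A's short-circuit index chain usually
-- raises IndexError, but can also return early (a win line seen before a missing index) where
-- B's uniform line construction itself raises IndexError.
def Pre_evaluate (ar : List (List String)) : Prop := 9 ≤ ar.flatten.length
instance (ar : List (List String)) : Decidable (Pre_evaluate ar) := by unfold Pre_evaluate; infer_instance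

def pvWitness_evaluate : List (List String) :=
  [["X", "O", "X"], ["O", "X", "O"], [" ", " ", "X"]]

def Spec_evaluate (ar : List (List String)) (out : Int) : Prop := out = evaluate_alt ar
instance (ar : List (List String)) (out : Int) : Decidable (Spec_evaluate ar out) := by unfold Spec_evaluate; infer_instance

-- ===== CLAIM (what is proved, stated in full; the proofs are below) =====
def Claim_equal_evaluate : Prop := ∀ (ar : List (List String)), Dom_evaluate ar → Pre_evaluate ar → Spec_evaluate ar (evaluate ar)

-- ===== LEMMAS AND PROOFS =====

-- one step of B's inner 'for line in …' loop, as an Int-level continuation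
def pvB0 (l : List String) (cont : Int) : Int :=
  match pvWinner l with
  | some w => (pvSCORE.get? w).getD 0
  | none => cont

theorem pv_foldl_flattenA (ar : List (List String)) (acc : List String) :
    ar.foldl (fun acc i => i.foldl (fun acc2 j => acc2 ++ [j]) acc) acc = acc ++ ar.flatten := by
  induction ar generalizing acc with
  | nil => simp
  | cons hd tl ih =>
      rw [List.foldl_cons, PySem.List.foldl_append_singleton, ih]
      simp

theorem pv_foldl_flattenB (ar : List (List String)) (acc : List String) :
    ar.foldl (fun acc row => acc ++ row) acc = acc ++ ar.flatten := by
  induction ar generalizing acc with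
  | nil => simp
  | cons hd tl ih => rw [List.foldl_cons, ih]; simp

theorem pv_exists9 {α : Type} (l : List α) (h : 9 ≤ l.length) :
    ∃ a b c d e f g h1 i t, l = a::b::c::d::e::f::g::h1::i::t := by
  rcases l with _|⟨a,_|⟨b,_|⟨c,_|⟨d,_|⟨e,_|⟨f,_|⟨g,_|⟨h1,_|⟨i,t⟩⟩⟩⟩⟩⟩⟩⟩⟩ <;>
    first
      | (exact ⟨_,_,_,_,_,_,_,_,_,_,rfl⟩)
      | (simp at h)

theorem pv_score_O : ((pvSCORE.get? "O").getD 0) = 1 := by decide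

theorem pv_score_X : ((pvSCORE.get? "X").getD 0) = -1 := by decide

theorem pv_winner_triple (a b c : String) :
    pvWinner [a, b, c] = if (a = b ∧ b = c) ∧ (a = "O" ∨ a = "X") then some a else none := by
  unfold pvWinner
  simp only [PySem.List.pyGetD_zero_cons]
  by_cases he : a = b ∧ b = c
  · obtain ⟨hb, hc⟩ := he
    subst hc; subst hb
    by_cases hO : a = "O"
    · subst hO; decide
    · by_cases hX : a = "X"
      · subst hX; decide
      · have hcont : pvSCORE.contains a = false := by
          have h : pvSCORE = PySem.Dict.mk [("O", 1), ("X", -1)] := rfl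
          rw [h]
          have hO' : ¬"O" = a := fun h' => hO h'.symm
          have hX' : ¬"X" = a := fun h' => hX h'.symm
          simp [hO', hX']
        simp [hcont, hO, hX]
  · have hcnt : PySem.List.count [a, b, c] a ≠ 3 := by
      by_cases hb : b = a <;> by_cases hc : c = a
      · exact absurd ⟨hb.symm, hb.trans hc.symm⟩ he
      · simp [PySem.List.count_eq, hb, hc]
      · simp [PySem.List.count_eq, hb, hc]
      · simp [PySem.List.count_eq, hb, hc]
    have l1 : ¬(PySem.List.count [a, b, c] a = 3 ∧ pvSCORE.contains a = true) :=
      fun hh => hcnt hh.1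
    have l2 : ¬((a = b ∧ b = c) ∧ (a = "O" ∨ a = "X")) := fun hh => he hh.1
    rw [if_neg l1, if_neg l2]

-- pvB0 as an Option chain (for rewriting under by_cases)
theorem pvB0_eq (l : List String) (cont : Int) :
    pvB0 l cont = ((pvWinner l).map (fun w => (pvSCORE.get? w).getD 0)).getD cont := by
  cases h : pvWinner l <;> simp [pvB0, h]

-- one of A's OR-blocks (representative cell r shared by both lines) equals two consecutive
-- steps of B's line scan
theorem pv_block (a1 b1 c1 a2 b2 c2 r : String) (cont : Int)
    (h1 : a1 = b1 → b1 = c1 → r = a1) (h2 : a2 = b2 → b2 = c2 → r = a2) :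
    (if (a1 = b1 ∧ b1 = c1) ∨ (a2 = b2 ∧ b2 = c2) then
       if r ≠ " " ∧ r = pvC then 1 else if r ≠ " " ∧ r = pvU then -1 else cont
     else cont)
    = pvB0 [a1, b1, c1] (pvB0 [a2, b2, c2] cont) := by
  rw [pvB0_eq, pvB0_eq, pv_winner_triple, pv_winner_triple]
  by_cases P1 : (a1 = b1 ∧ b1 = c1) ∧ (a1 = "O" ∨ a1 = "X")
  · obtain ⟨⟨hb, hc⟩, hv⟩ := P1
    have hr : r = a1 := h1 hb hc
    subst hc; subst hb; subst hr
    rcases hv with hv | hv <;> subst hv <;> simp [pvC, pvU, pv_score_O, pv_score_X]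
  · by_cases P2 : (a2 = b2 ∧ b2 = c2) ∧ (a2 = "O" ∨ a2 = "X")
    · obtain ⟨⟨hb, hc⟩, hv⟩ := P2
      have hr : r = a2 := h2 hb hc
      subst hc; subst hb; subst hr
      rcases hv with hv | hv <;> subst hv <;>
        simp [P1, pvC, pvU, pv_score_O, pv_score_X]
    · by_cases W : (a1 = b1 ∧ b1 = c1) ∨ (a2 = b2 ∧ b2 = c2)
      · rw [if_pos W]
        have hnr : r ≠ "O" ∧ r ≠ "X" := by
          rcases W with w | w
          · exact ⟨fun h => P1 ⟨w, Or.inl ((h1 w.1 w.2).symm.trans h)⟩,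
                   fun h => P1 ⟨w, Or.inr ((h1 w.1 w.2).symm.trans h)⟩⟩
          · exact ⟨fun h => P2 ⟨w, Or.inl ((h2 w.1 w.2).symm.trans h)⟩,
                   fun h => P2 ⟨w, Or.inr ((h2 w.1 w.2).symm.trans h)⟩⟩
        simp [P1, P2, pvC, pvU, hnr.1, hnr.2]
      · rw [if_neg W]
        simp [P1, P2]

theorem pv_pairs (ps : List (List String × List String)) (k : Int) :
    (match pvScanPairs ps with | some v => v | none => k)
      = ps.foldr (fun p acc => pvB0 p.1 (pvB0 p.2 acc)) k := by
  induction ps with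
  | nil => simp [pvScanPairs]
  | cons p rest ih =>
      obtain ⟨r, c⟩ := p
      cases h1 : pvWinner r <;> cases h2 : pvWinner c <;>
        simp [pvScanPairs, List.foldr, pvB0, h1, h2, ih]

theorem pv_lines (ls : List (List String)) (k : Int) :
    (match pvScanLines ls with | some v => v | none => k)
      = ls.foldr pvB0 k := by
  induction ls with
  | nil => simp [pvScanLines]
  | cons l rest ih =>
      cases h1 : pvWinner l <;> simp [pvScanLines, List.foldr, pvB0, h1, ih]

set_option maxHeartbeats 1600000 in
theorem pv_key (x0 x1 x2 x3 x4 x5 x6 x7 x8 : String) (t : List String) :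
    pvA1 (fun n => (PySem.List.pyGet? (x0::x1::x2::x3::x4::x5::x6::x7::x8::t) n).getD "")
    = pvB0 [x0,x1,x2] (pvB0 [x0,x3,x6] (pvB0 [x3,x4,x5] (pvB0 [x1,x4,x7]
        (pvB0 [x6,x7,x8] (pvB0 [x2,x5,x8] (pvB0 [x0,x4,x8] (pvB0 [x2,x4,x6] 0))))))) := by
  have h0 : PySem.List.pyGet? (x0::x1::x2::x3::x4::x5::x6::x7::x8::t) ((0:Nat):Int) = some x0 := by
    rw [PySem.List.pyGet?_natCast]; rfl
  have h0' : PySem.List.pyGet? (x0::x1::x2::x3::x4::x5::x6::x7::x8::t) ((0):Int) = some x0 := h0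
  have h1 : PySem.List.pyGet? (x0::x1::x2::x3::x4::x5::x6::x7::x8::t) ((1:Nat):Int) = some x1 := by
    rw [PySem.List.pyGet?_natCast]; rfl
  have h1' : PySem.List.pyGet? (x0::x1::x2::x3::x4::x5::x6::x7::x8::t) ((1):Int) = some x1 := h1
  have h2 : PySem.List.pyGet? (x0::x1::x2::x3::x4::x5::x6::x7::x8::t) ((2:Nat):Int) = some x2 := by
    rw [PySem.List.pyGet?_natCast]; rfl
  have h2' : PySem.List.pyGet? (x0::x1::x2::x3::x4::x5::x6::x7::x8::t) ((2):Int) = some x2 := h2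
  have h3 : PySem.List.pyGet? (x0::x1::x2::x3::x4::x5::x6::x7::x8::t) ((3:Nat):Int) = some x3 := by
    rw [PySem.List.pyGet?_natCast]; rfl
  have h3' : PySem.List.pyGet? (x0::x1::x2::x3::x4::x5::x6::x7::x8::t) ((3):Int) = some x3 := h3
  have h4 : PySem.List.pyGet? (x0::x1::x2::x3::x4::x5::x6::x7::x8::t) ((4:Nat):Int) = some x4 := by
    rw [PySem.List.pyGet?_natCast]; rfl
  have h4' : PySem.List.pyGet? (x0::x1::x2::x3::x4::x5::x6::x7::x8::t) ((4):Int) = some x4 := h4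
  have h5 : PySem.List.pyGet? (x0::x1::x2::x3::x4::x5::x6::x7::x8::t) ((5:Nat):Int) = some x5 := by
    rw [PySem.List.pyGet?_natCast]; rfl
  have h5' : PySem.List.pyGet? (x0::x1::x2::x3::x4::x5::x6::x7::x8::t) ((5):Int) = some x5 := h5
  have h6 : PySem.List.pyGet? (x0::x1::x2::x3::x4::x5::x6::x7::x8::t) ((6:Nat):Int) = some x6 := by
    rw [PySem.List.pyGet?_natCast]; rfl
  have h6' : PySem.List.pyGet? (x0::x1::x2::x3::x4::x5::x6::x7::x8::t) ((6):Int) = some x6 := h6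
  have h7 : PySem.List.pyGet? (x0::x1::x2::x3::x4::x5::x6::x7::x8::t) ((7:Nat):Int) = some x7 := by
    rw [PySem.List.pyGet?_natCast]; rfl
  have h7' : PySem.List.pyGet? (x0::x1::x2::x3::x4::x5::x6::x7::x8::t) ((7):Int) = some x7 := h7
  have h8 : PySem.List.pyGet? (x0::x1::x2::x3::x4::x5::x6::x7::x8::t) ((8:Nat):Int) = some x8 := by
    rw [PySem.List.pyGet?_natCast]; rfl
  have h8' : PySem.List.pyGet? (x0::x1::x2::x3::x4::x5::x6::x7::x8::t) ((8):Int) = some x8 := h8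
  have k4 : pvA4 (fun n => (PySem.List.pyGet? (x0::x1::x2::x3::x4::x5::x6::x7::x8::t) n).getD "")
      = pvB0 [x0,x4,x8] (pvB0 [x2,x4,x6] 0) := by
    simp only [pvA4]
    simp only [h0', h2', h4', h6', h8', Option.getD_some]
    exact pv_block x0 x4 x8 x2 x4 x6 x4 0 (fun h _ => h.symm) (fun h _ => h.symm)
  have k3 : pvA3 (fun n => (PySem.List.pyGet? (x0::x1::x2::x3::x4::x5::x6::x7::x8::t) n).getD "")
      = pvB0 [x6,x7,x8] (pvB0 [x2,x5,x8] (pvB0 [x0,x4,x8] (pvB0 [x2,x4,x6] 0))) := by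
    simp only [pvA3]
    simp only [h2', h5', h6', h7', h8', Option.getD_some]
    rw [k4]
    exact pv_block x6 x7 x8 x2 x5 x8 x8 _ (fun h hh => (h.trans hh).symm) (fun h hh => (h.trans hh).symm)
  have k2 : pvA2 (fun n => (PySem.List.pyGet? (x0::x1::x2::x3::x4::x5::x6::x7::x8::t) n).getD "")
      = pvB0 [x3,x4,x5] (pvB0 [x1,x4,x7] (pvB0 [x6,x7,x8] (pvB0 [x2,x5,x8] (pvB0 [x0,x4,x8] (pvB0 [x2,x4,x6] 0))))) := by
    simp only [pvA2]
    simp only [h1', h3', h4', h5', h7', Option.getD_some]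
    rw [k3]
    exact pv_block x3 x4 x5 x1 x4 x7 x4 _ (fun h _ => h.symm) (fun h _ => h.symm)
  simp only [pvA1]
  simp only [h0', h1', h2', h3', h6', Option.getD_some]
  rw [k2]
  exact pv_block x0 x1 x2 x0 x3 x6 x0 _ (fun _ _ => rfl) (fun _ _ => rfl)

-- ===== VERDICT (by name: the statement is the Claim_ definition above) =====
theorem evaluate_spec : Claim_equal_evaluate := by
  intro ar _hdom hpre
  unfold Spec_evaluate
  unfold Pre_evaluate at hpre
  obtain ⟨x0, x1, x2, x3, x4, x5, x6, x7, x8, t, hl⟩ := pv_exists9 ar.flatten hpre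
  have s0 : PySem.List.slice (x0::x1::x2::x3::x4::x5::x6::x7::x8::t) (some 0) (some 3) = [x0,x1,x2] := by
    rw [PySem.List.slice_toNat] <;> first | rfl | norm_num
  have s1 : PySem.List.slice (x0::x1::x2::x3::x4::x5::x6::x7::x8::t) (some 3) (some 6) = [x3,x4,x5] := by
    rw [PySem.List.slice_toNat] <;> first | rfl | norm_num
  have s2 : PySem.List.slice (x0::x1::x2::x3::x4::x5::x6::x7::x8::t) (some 6) (some 9) = [x6,x7,x8] := by
    rw [PySem.List.slice_toNat] <;> first | rfl | norm_num
  have g0 : PySem.List.pyGetD (x0::x1::x2::x3::x4::x5::x6::x7::x8::t) (0:Int) "" = x0 := by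
    simp [PySem.List.pyGetD_zero_cons]
  have g2 : PySem.List.pyGetD (x0::x1::x2::x3::x4::x5::x6::x7::x8::t) (2:Int) "" = x2 := by
    have := PySem.List.pyGetD_natCast (x0::x1::x2::x3::x4::x5::x6::x7::x8::t) 2 ""; norm_num at this; simpa using this
  have g4 : PySem.List.pyGetD (x0::x1::x2::x3::x4::x5::x6::x7::x8::t) (4:Int) "" = x4 := by
    have := PySem.List.pyGetD_natCast (x0::x1::x2::x3::x4::x5::x6::x7::x8::t) 4 ""; norm_num at this; simpa using this
  have g6 : PySem.List.pyGetD (x0::x1::x2::x3::x4::x5::x6::x7::x8::t) (6:Int) "" = x6 := by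
    have := PySem.List.pyGetD_natCast (x0::x1::x2::x3::x4::x5::x6::x7::x8::t) 6 ""; norm_num at this; simpa using this
  have g8 : PySem.List.pyGetD (x0::x1::x2::x3::x4::x5::x6::x7::x8::t) (8:Int) "" = x8 := by
    have := PySem.List.pyGetD_natCast (x0::x1::x2::x3::x4::x5::x6::x7::x8::t) 8 ""; norm_num at this; simpa using this
  show evaluate ar = evaluate_alt ar
  unfold evaluate evaluate_alt
  simp only [pv_foldl_flattenA, pv_foldl_flattenB, List.nil_append, hl, s0, s1, s2]
  simp only [List.zip, List.zipWith, List.map, g0, g2, g4, g6, g8]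
  rw [pv_pairs, pv_lines]
  simp only [List.foldr]
  exact pv_key x0 x1 x2 x3 x4 x5 x6 x7 x8 t
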